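-- pv_equiv track=rewrite | github.com/SimengZou/WATERCARE | dbt-acquisition/scripts/util/json_schema.py | get_snowflake_path
-- ===== SOURCE A (Python) =====
-- from typing import Dict, List, overload
--
-- def get_snowflake_path(path: List[str], current_cte: str, json_col: str) -> str:
--     if current_cte == 'root':
--       clean_segments = [p for p in path if p != '[*]']
--       return f'{json_col}:' + ':'.join(clean_segments)
--     else:
--       try:
--         last_star_index = len(path) - 1 - path[::-1].index('[*]')
--         segments_after_flatten = path[last_star_index + 1:]
--         if not segments_after_flatten:
--           return 'f.value'
--         return 'f.value:' + ':'.join(segments_after_flatten)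
--       except ValueError:
--         return 'f.value'
-- ===== SOURCE B (Python) =====
-- def get_snowflake_path(path, current_cte, json_col):
--     if current_cte == 'root':
--         clean_segments = [p for p in path if p != '[*]']
--         return f'{json_col}:' + ':'.join(clean_segments)
--     buf = []
--     for seg in reversed(path):
--         if seg == '[*]':
--             if buf:
--                 return 'f.value:' + ':'.join(reversed(buf))
--             return 'f.value'
--         buf.append(seg)
--     return 'f.value'
-- ===== Notes on version B (the rewrite author's own statement) =====
-- stated objective: alternative
-- what changed: The non-root branch scans path once from the end with a buffer and an early return at the first '[*]', instead of computing the last-star index via reversed .index and slicing; the no-star and empty-suffix cases both fall out as 'f.value' without try/except.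
import Mathlib
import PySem

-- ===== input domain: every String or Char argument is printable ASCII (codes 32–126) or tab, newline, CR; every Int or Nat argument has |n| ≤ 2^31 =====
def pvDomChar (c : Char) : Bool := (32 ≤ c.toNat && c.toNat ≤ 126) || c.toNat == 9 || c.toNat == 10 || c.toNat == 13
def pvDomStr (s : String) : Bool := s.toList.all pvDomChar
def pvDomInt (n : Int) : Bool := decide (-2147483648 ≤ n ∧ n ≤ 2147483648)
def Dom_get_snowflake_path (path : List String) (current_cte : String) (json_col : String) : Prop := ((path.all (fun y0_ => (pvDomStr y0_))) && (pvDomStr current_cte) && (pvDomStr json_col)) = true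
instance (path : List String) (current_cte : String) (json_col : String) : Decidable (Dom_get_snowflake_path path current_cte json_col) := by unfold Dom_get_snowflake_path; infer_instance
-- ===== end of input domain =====

-- B replaces the reversed-.index/slice/try-except of the non-root branch by a single
-- backward scan with a buffer and an early return at the first '[*]' (objective: alternative).

-- ===== PORT A =====
def get_snowflake_path (path : List String) (current_cte : String) (json_col : String) : String :=
  if current_cte == "root" then
    let clean_segments := path.filter (fun p => p != "[*]")
    json_col ++ ":" ++ PySem.Str.join ":" clean_segments
  else
    match PySem.List.index? path.reverse "[*]" with
    | some i =>
        let last_star_index : Int := (path.length : Int) - 1 - (i : Int)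
        let segments_after_flatten := PySem.List.slice path (some (last_star_index + 1)) none
        if segments_after_flatten.isEmpty then "f.value"
        else "f.value:" ++ PySem.Str.join ":" segments_after_flatten
    | none => "f.value"

-- ===== PORT B =====
-- the backward scan of Source B: buf collects segments until the first '[*]' (early return there)
def altScan (rp : List String) (buf : List String) : String :=
  match rp with
  | [] => "f.value"
  | seg :: rest =>
      if seg == "[*]" then
        if buf.isEmpty then "f.value"
        else "f.value:" ++ PySem.Str.join ":" buf.reverse
      else altScan rest (buf ++ [seg])

def get_snowflake_path_alt (path : List String) (current_cte : String) (json_col : String) : String :=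
  if current_cte == "root" then
    let clean_segments := path.filter (fun p => p != "[*]")
    json_col ++ ":" ++ PySem.Str.join ":" clean_segments
  else
    altScan path.reverse []

-- ===== PRECONDITION & SPEC =====
def Spec_get_snowflake_path (path : List String) (current_cte : String) (json_col : String) (out : String) : Prop := out = get_snowflake_path_alt path current_cte json_col
instance (path : List String) (current_cte : String) (json_col : String) (out : String) : Decidable (Spec_get_snowflake_path path current_cte json_col out) := by unfold Spec_get_snowflake_path; infer_instance

-- ===== CLAIM (what is proved, stated in full; the proofs are below) =====
def Claim_equal_get_snowflake_path : Prop := ∀ (path : List String) (current_cte : String) (json_col : String), Dom_get_snowflake_path path current_cte json_col → Spec_get_snowflake_path path current_cte json_col (get_snowflake_path path current_cte json_col)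

-- ===== LEMMAS AND PROOFS =====

-- altScan computes the result determined by the position of the first '[*]' in rp
theorem altScan_spec (rp : List String) (buf : List String) :
    altScan rp buf =
      match PySem.List.index? rp "[*]" with
      | none => "f.value"
      | some i =>
          let seg := (buf ++ rp.take i).reverse
          if seg.isEmpty then "f.value" else "f.value:" ++ PySem.Str.join ":" seg := by
  induction rp generalizing buf with
  | nil => simp [altScan, PySem.List.index?]
  | cons s rest ih =>
    by_cases hs : s = "[*]"
    · subst hs
      rw [PySem.List.index?_cons_self]
      simp [altScan]
    · rw [PySem.List.index?_cons_of_ne rest hs]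
      simp only [altScan, beq_iff_eq, if_neg hs, ih]
      cases h : PySem.List.index? rest "[*]" with
      | none => simp
      | some i => simp [List.append_assoc]

theorem get_snowflake_path_spec : Claim_equal_get_snowflake_path := by
  intro path current_cte json_col _
  unfold Spec_get_snowflake_path get_snowflake_path get_snowflake_path_alt
  by_cases hc : current_cte == "root"
  · simp [hc]
  · simp only [hc, Bool.false_eq_true, if_false]
    rw [altScan_spec]
    cases h : PySem.List.index? path.reverse "[*]" with
    | none => rfl
    | some i =>
      have hi : i < path.length := by
        have := PySem.List.getElem_of_index?_eq_some h
        obtain ⟨hk, _⟩ := this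
        simpa using hk
      have hdrop : PySem.List.slice path (some ((path.length : Int) - 1 - (i : Int) + 1)) none
          = (path.reverse.take i).reverse := by
        have hnn : (0:Int) ≤ (path.length : Int) - 1 - (i : Int) + 1 := by omega
        rw [PySem.List.slice_from path hnn]
        have ht : ((path.length : Int) - 1 - (i : Int) + 1).toNat = path.length - i := by omega
        rw [ht]
        rw [List.take_reverse]
        simp
      simp only [hdrop]
      simp
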